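-- pv_equiv track=rewrite | github.com/Anthony130703/Laboratorio-de-Lineal- | Dolores_Ccota_Robles_LAB1.py | construir_matriz_newton
-- ===== SOURCE A (Python) =====
-- def construir_matriz_newton(x_vals):
--
--     #construyendo la matriz triangular inferior para el metodo de newton
--     n = len(x_vals) #esta es una variable local de esta funcion
--     A = [[0 for _ in range(n)] for _ in range(n)]
--
--     for i in range(n):
--         A[i][0] = 1 # Primera columna siempre 1
--         for j in range(1, i + 1):
--             producto = 1
--             for k in range(j):
--                 producto *= (x_vals[i] - x_vals[k])
--             A[i][j] = producto
--     return A
-- ===== SOURCE B (Python) =====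
-- def construir_matriz_newton(x_vals):
--     # Incremental version: each row keeps a running product p, so the
--     # inner recomputation loop of the original disappears (O(n^2) total).
--     n = len(x_vals)
--     filas = []
--     for i, xi in enumerate(x_vals):
--         fila = [0] * n
--         p = 1
--         for j in range(i + 1):
--             fila[j] = p
--             p *= xi - x_vals[j]
--         filas.append(fila)
--     return filas
-- ===== Notes on version B (the rewrite author's own statement) =====
-- stated objective: faster
-- what changed: Instead of recomputing each entry's product from scratch with a third nested loop, B walks each row once with a running product (and builds the rows directly via enumerate instead of mutating a pre-built zero matrix).
import Mathlib
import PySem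

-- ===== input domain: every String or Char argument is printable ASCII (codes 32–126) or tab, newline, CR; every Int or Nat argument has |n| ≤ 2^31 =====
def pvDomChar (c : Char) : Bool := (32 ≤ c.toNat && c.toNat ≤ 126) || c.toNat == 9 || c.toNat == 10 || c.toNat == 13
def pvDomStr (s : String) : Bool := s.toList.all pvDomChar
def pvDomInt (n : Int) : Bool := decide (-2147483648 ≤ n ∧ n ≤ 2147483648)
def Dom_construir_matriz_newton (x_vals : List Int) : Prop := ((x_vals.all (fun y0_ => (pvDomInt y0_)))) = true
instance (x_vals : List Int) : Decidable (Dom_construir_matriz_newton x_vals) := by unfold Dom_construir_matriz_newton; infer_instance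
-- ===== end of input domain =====

-- B replaces A's per-entry product recomputation (triple loop) by one running product per row: O(n^2) instead of O(n^3).

-- ===== PORT A =====
def construir_matriz_newton (x_vals : List Int) : List (List Int) :=
  let n : Int := PySem.List.len x_vals
  let A0 : List (List Int) :=
    (PySem.List.pyRange 0 n 1).map (fun _ => (PySem.List.pyRange 0 n 1).map (fun _ => (0 : Int)))
  (PySem.List.pyRange 0 n 1).foldl (fun A i =>
    let A1 := PySem.List.pySetD A i (PySem.List.pySetD (PySem.List.pyGetD A i []) 0 1)
    (PySem.List.pyRange 1 (i + 1) 1).foldl (fun Ac j =>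
      let producto : Int := (PySem.List.pyRange 0 j 1).foldl (fun p k =>
        p * (PySem.List.pyGetD x_vals i 0 - PySem.List.pyGetD x_vals k 0)) 1
      PySem.List.pySetD Ac i (PySem.List.pySetD (PySem.List.pyGetD Ac i []) j producto)) A1) A0

-- ===== PORT B =====
def construir_matriz_newton_alt (x_vals : List Int) : List (List Int) :=
  let n : Int := PySem.List.len x_vals
  (PySem.List.enumerate x_vals).map (fun ixi =>
    ((PySem.List.pyRange 0 (ixi.1 + 1) 1).foldl
      (fun (s : List Int × Int) j =>
        (PySem.List.pySetD s.1 j s.2, s.2 * (ixi.2 - PySem.List.pyGetD x_vals j 0)))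
      (PySem.List.pyRepeat [(0 : Int)] n, 1)).1)

-- ===== PRECONDITION & SPEC =====
def Spec_construir_matriz_newton (x_vals : List Int) (out : List (List Int)) : Prop := out = construir_matriz_newton_alt x_vals
instance (x_vals : List Int) (out : List (List Int)) : Decidable (Spec_construir_matriz_newton x_vals out) := by unfold Spec_construir_matriz_newton; infer_instance

-- ===== CLAIM (what is proved, stated in full; the proofs are below) =====
def Claim_equal_construir_matriz_newton : Prop := ∀ (x_vals : List Int), Dom_construir_matriz_newton x_vals → Spec_construir_matriz_newton x_vals (construir_matriz_newton x_vals)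

-- ===== LEMMAS AND PROOFS =====

-- producto of A at column j of row with node value c: prod_{k<j} (c - x_k)
def pvP (x : List Int) (c : Int) (j : Int) : Int :=
  (PySem.List.pyRange 0 j 1).foldl (fun p k => p * (c - PySem.List.pyGetD x k 0)) 1

-- row i as A computes it, starting from row r: set column 0 to 1, then columns 1..i to pvP
def pvRow (x : List Int) (c : Int) (i : Int) (r : List Int) : List Int :=
  (PySem.List.pyRange 1 (i + 1) 1).foldl
    (fun row j => PySem.List.pySetD row j (pvP x c j)) (PySem.List.pySetD r 0 1)

lemma pv_set_getD_self (A : List (List Int)) (i : Nat) (h : i < A.length) :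
    A.set i (A.getD i []) = A := by
  simp [List.getD_eq_getElem?_getD, List.getElem?_eq_getElem h]

lemma pv_getD_set_self (A : List (List Int)) (i : Nat) (v : List Int) (h : i < A.length) :
    (A.set i v).getD i [] = v := by
  simp [List.getD_eq_getElem?_getD, h]

lemma pv_getD_set_ne (A : List (List Int)) (i j : Nat) (v : List Int) (h : j ≠ i) :
    (A.set j v).getD i [] = A.getD i [] := by
  simp [List.getD_eq_getElem?_getD, List.getElem?_set_ne h]

lemma pv_take_set (A : List (List Int)) (m : Nat) (v : List Int) (h : m < A.length) :
    (A.set m v).take (m + 1) = A.take m ++ [v] := by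
  rw [List.set_eq_take_append_cons_drop]; simp [h]
  rw [List.take_append]
  simp [List.length_take, Nat.min_eq_left (le_of_lt h)]

-- collapsing A's inner loop: the matrix-state fold that only touches row i is a set of row i
lemma pvInner (step : Int → List Int → List Int) :
    ∀ (L : List Int) (i : Nat) (A : List (List Int)), i < A.length →
      L.foldl (fun Ac j => PySem.List.pySetD Ac (i : Int) (step j (PySem.List.pyGetD Ac (i : Int) []))) A
      = A.set i (L.foldl (fun r j => step j r) (A.getD i [])) := by
  intro L
  induction L with
  | nil =>
      intro i A h
      simp only [List.foldl_nil]
      exact (pv_set_getD_self A i h).symm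
  | cons j L ih =>
      intro i A h
      rw [List.foldl_cons, ih i _ (by simp [h])]
      simp only [PySem.List.pySetD_natCast, PySem.List.pyGetD_natCast]
      rw [List.set_set, pv_getD_set_self A i _ h, List.foldl_cons]

-- A's outer loop: each iteration replaces its own (still zero) row
lemma pvOuter (F : List (List Int) → Int → List (List Int)) (g : Nat → List Int → List Int)
    (zr : List Int)
    (hF : ∀ (A : List (List Int)) (t : Nat), t < A.length → F A (t : Int) = A.set t (g t (A.getD t []))) :
    ∀ (k m : Nat) (A : List (List Int)), A.length = m + k →
      (∀ j, m ≤ j → j < A.length → A.getD j [] = zr) →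
      ((List.range' m k).map (fun (t : Nat) => (t : Int))).foldl F A
      = A.take m ++ (List.range' m k).map (fun t => g t zr) := by
  intro k
  induction k with
  | zero =>
      intro m A hlen _
      have hle : A.length ≤ m := by omega
      simp [List.take_of_length_le hle]
  | succ k ih =>
      intro m A hlen hz
      have hm : m < A.length := by omega
      rw [List.range'_succ]
      simp only [List.map_cons, List.foldl_cons]
      rw [hF A m hm, hz m le_rfl hm,
        ih (m + 1) _ (by rw [List.length_set]; omega)
          (fun j h1 h2 => by
            rw [pv_getD_set_ne A j m _ (by omega)]
            exact hz j (by omega) (by simpa using h2)),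
        pv_take_set A m _ hm]
      simp

-- B's per-row fold: running product = A's producto at each column
lemma pvPairFold (x : List Int) (c : Int) :
    ∀ (m : Nat) (r : List Int),
      (PySem.List.pyRange 0 ((m : Int) + 1) 1).foldl
        (fun (s : List Int × Int) j =>
          (PySem.List.pySetD s.1 j s.2, s.2 * (c - PySem.List.pyGetD x j 0))) (r, 1)
      = (pvRow x c (m : Int) r, pvP x c ((m : Int) + 1)) := by
  intro m
  induction m with
  | zero =>
      intro r
      have h01 : PySem.List.pyRange 0 1 1 = [0] := by
        have := PySem.List.pyRange_one_singleton (0 : Int)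
        norm_num at this
        exact this
      rw [show ((0 : Nat) : Int) + 1 = (1 : Int) by norm_num, h01]
      simp [pvRow, pvP, PySem.List.pyRange_one_eq_nil (le_refl (1 : Int)), h01]
  | succ m ih =>
      intro r
      have hc : ((m + 1 : Nat) : Int) + 1 = ((m : Int) + 1) + 1 := by push_cast; ring
      rw [hc, PySem.List.pyRange_one_succ_right (by positivity), List.foldl_append, ih]
      rw [Prod.mk.injEq]
      have hrow : pvRow x c ((m + 1 : Nat) : Int) r
          = PySem.List.pySetD (pvRow x c (m : Int) r) ((m : Int) + 1) (pvP x c ((m : Int) + 1)) := by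
        unfold pvRow
        rw [hc, PySem.List.pyRange_one_succ_right (by omega), List.foldl_append]
        simp
      have hp : pvP x c (((m + 1 : Nat) : Int) + 1)
          = pvP x c ((m : Int) + 1) * (c - PySem.List.pyGetD x ((m : Int) + 1) 0) := by
        unfold pvP
        rw [hc, PySem.List.pyRange_one_succ_right (by positivity), List.foldl_append]
        simp
      push_cast at hrow hp ⊢
      exact ⟨hrow.symm, hp.symm⟩

lemma pv_pyRange_len (n : Nat) :
    PySem.List.pyRange 0 (n : Int) 1 = (List.range n).map (fun (t : Nat) => (t : Int)) := by
  rw [PySem.List.pyRange_one]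
  simp

-- A in closed form: row t is pvRow applied to the zero row
lemma pvA (x : List Int) :
    construir_matriz_newton x
    = (List.range x.length).map (fun (t : Nat) =>
        pvRow x (PySem.List.pyGetD x (t : Int) 0) (t : Int) (List.replicate x.length (0 : Int))) := by
  unfold construir_matriz_newton
  simp only [PySem.List.len_eq]
  have hzr : (PySem.List.pyRange 0 (x.length : Int) 1).map (fun _ => (0 : Int))
      = List.replicate x.length (0 : Int) := by
    rw [List.map_const']
    simp [PySem.List.length_pyRange_one]
  set zr := List.replicate x.length (0 : Int) with hzrdef
  rw [hzr, pv_pyRange_len, List.range_eq_range']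
  rw [pvOuter _ (fun t r => pvRow x (PySem.List.pyGetD x (t : Int) 0) (t : Int) r) zr
    (fun A t ht => by
      have h1 : PySem.List.pySetD A (t : Int) (PySem.List.pySetD (PySem.List.pyGetD A (t : Int) []) 0 1)
          = A.set t (PySem.List.pySetD (A.getD t []) 0 1) := by
        simp
      rw [h1]
      have h2 := pvInner
        (fun j r => PySem.List.pySetD r j
          (pvP x (PySem.List.pyGetD x (t : Int) 0) j))
        (PySem.List.pyRange 1 ((t : Int) + 1) 1) t
        (A.set t (PySem.List.pySetD (A.getD t []) 0 1)) (by simpa using ht)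
      simp only [pvP] at h2
      rw [h2, List.set_set, pv_getD_set_self A t _ ht]
      rfl)
    x.length 0 _ (by simp)
    (fun j _ hj => by
      have hj' : j < x.length := by
        simpa [PySem.List.length_pyRange_one] using hj
      rw [List.getD_eq_getElem?_getD]
      simp [hj'])]
  simp

-- B in closed form: the same rows
lemma pvB (x : List Int) :
    construir_matriz_newton_alt x
    = (List.range x.length).map (fun (t : Nat) =>
        pvRow x (PySem.List.pyGetD x (t : Int) 0) (t : Int) (List.replicate x.length (0 : Int))) := by
  unfold construir_matriz_newton_alt
  simp only [PySem.List.len_eq]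
  rw [PySem.List.enumerate_eq_map_pyRange (d := 0), PySem.List.len_eq, pv_pyRange_len,
    List.map_map, List.map_map]
  refine List.map_congr_left (fun t _ => ?_)
  simp only [Function.comp]
  rw [PySem.List.pyRepeat_singleton]
  have := pvPairFold x (PySem.List.pyGetD x (t : Int) 0) t (List.replicate x.length (0 : Int))
  simp only [Int.toNat_natCast]
  rw [this]

-- ===== VERDICT (by name: the statement is the Claim_ definition above) =====
theorem construir_matriz_newton_spec : Claim_equal_construir_matriz_newton := by
  intro x _
  unfold Spec_construir_matriz_newton
  rw [pvA, pvB]
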